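-- pv_equiv track=rewrite | github.com/Ftyigffifygf/NEURODX | federated_learning/fault_tolerance.py | _determine_failure_severity
-- ===== SOURCE A (Python) =====
-- from typing import Dict, List, Optional, Any, Set
--
-- def _determine_failure_severity(issues: List[str]) -> str:
--     """Determine failure severity based on issues"""
--     critical_keywords = ['timeout', 'connection_lost', 'memory']
--     high_keywords = ['error_count', 'cpu']
--
--     for issue in issues:
--         if any(keyword in issue.lower() for keyword in critical_keywords):
--             return 'critical'
--
--     for issue in issues:
--         if any(keyword in issue.lower() for keyword in high_keywords):
--             return 'high'
--
--     return 'medium' if len(issues) > 2 else 'low'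
-- ===== SOURCE B (Python) =====
-- def _determine_failure_severity(issues):
--     """Determine failure severity based on issues (single pass)."""
--     critical_keywords = ['timeout', 'connection_lost', 'memory']
--     high_keywords = ['error_count', 'cpu']
--
--     has_high = False
--     for issue in issues:
--         low = issue.lower()
--         if any(k in low for k in critical_keywords):
--             return 'critical'
--         if any(k in low for k in high_keywords):
--             has_high = True
--     if has_high:
--         return 'high'
--     return 'medium' if len(issues) > 2 else 'low'
-- ===== Notes on version B (the rewrite author's own statement) =====
-- stated objective: simpler
-- what changed: Replaces A's two sequential scans with one loop that returns 'critical' immediately and accumulates a has_high flag, deciding 'high'/'medium'/'low' after the loop.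
import Mathlib
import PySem

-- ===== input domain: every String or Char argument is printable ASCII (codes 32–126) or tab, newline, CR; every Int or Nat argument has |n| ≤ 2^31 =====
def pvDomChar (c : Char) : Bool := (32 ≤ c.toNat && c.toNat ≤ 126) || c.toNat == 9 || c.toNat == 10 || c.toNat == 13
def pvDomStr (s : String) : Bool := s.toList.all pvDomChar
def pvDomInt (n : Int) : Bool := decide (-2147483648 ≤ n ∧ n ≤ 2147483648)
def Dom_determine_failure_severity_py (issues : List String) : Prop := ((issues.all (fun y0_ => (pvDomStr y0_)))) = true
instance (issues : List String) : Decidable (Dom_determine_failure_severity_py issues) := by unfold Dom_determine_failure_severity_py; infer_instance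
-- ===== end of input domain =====

-- B replaces A's two sequential scans with a single pass that returns 'critical'
-- immediately and accumulates a has_high flag (objective: simpler).

-- ===== PORT A =====
def pvCriticalKeywords : List String := ["timeout", "connection_lost", "memory"]
def pvHighKeywords : List String := ["error_count", "cpu"]

-- first 'for' loop of A: returns some "critical" on the triggering issue, none if it falls through
def pvALoop1 : List String → Option String
  | [] => none
  | issue :: rest =>
    if pvCriticalKeywords.any (fun keyword => PySem.Str.isIn keyword (PySem.Str.lower issue)) then
      some "critical"
    else pvALoop1 rest

-- second 'for' loop of A
def pvALoop2 : List String → Option String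
  | [] => none
  | issue :: rest =>
    if pvHighKeywords.any (fun keyword => PySem.Str.isIn keyword (PySem.Str.lower issue)) then
      some "high"
    else pvALoop2 rest

def determine_failure_severity_py (issues : List String) : String :=
  match pvALoop1 issues with
  | some r => r
  | none =>
    match pvALoop2 issues with
    | some r => r
    | none => if issues.length > 2 then "medium" else "low"

-- ===== PORT B =====
-- single loop of B: 'all' is the full list (for len(issues) after the loop), hasHigh the flag
def pvBLoop (all : List String) : List String → Bool → String
  | [], hasHigh => if hasHigh then "high" else if all.length > 2 then "medium" else "low"
  | issue :: rest, hasHigh =>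
    let low := PySem.Str.lower issue
    if pvCriticalKeywords.any (fun k => PySem.Str.isIn k low) then "critical"
    else pvBLoop all rest (hasHigh || pvHighKeywords.any (fun k => PySem.Str.isIn k low))

def determine_failure_severity_py_alt (issues : List String) : String :=
  pvBLoop issues issues false

-- ===== PRECONDITION & SPEC =====
def Spec_determine_failure_severity_py (issues : List String) (out : String) : Prop := out = determine_failure_severity_py_alt issues
instance (issues : List String) (out : String) : Decidable (Spec_determine_failure_severity_py issues out) := by unfold Spec_determine_failure_severity_py; infer_instance

-- ===== CLAIM (what is proved, stated in full; the proofs are below) =====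
def Claim_equal_determine_failure_severity_py : Prop := ∀ (issues : List String), Dom_determine_failure_severity_py issues → Spec_determine_failure_severity_py issues (determine_failure_severity_py issues)

-- ===== LEMMAS AND PROOFS =====
def pvCrit (s : String) : Bool := pvCriticalKeywords.any (fun k => PySem.Str.isIn k (PySem.Str.lower s))
def pvHigh (s : String) : Bool := pvHighKeywords.any (fun k => PySem.Str.isIn k (PySem.Str.lower s))

theorem pvALoop1_eq (l : List String) :
    pvALoop1 l = if l.any pvCrit then some "critical" else none := by
  induction l with
  | nil => rfl
  | cons a t ih =>
    have e : pvALoop1 (a :: t) = if pvCrit a then some "critical" else pvALoop1 t := rfl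
    rw [e, List.any_cons, ih]
    cases hC : pvCrit a <;> simp

theorem pvALoop2_eq (l : List String) :
    pvALoop2 l = if l.any pvHigh then some "high" else none := by
  induction l with
  | nil => rfl
  | cons a t ih =>
    have e : pvALoop2 (a :: t) = if pvHigh a then some "high" else pvALoop2 t := rfl
    rw [e, List.any_cons, ih]
    cases hC : pvHigh a <;> simp

theorem pvBLoop_eq (all : List String) (l : List String) (h : Bool) :
    pvBLoop all l h =
      if l.any pvCrit then "critical"
      else if h || l.any pvHigh then "high"
      else if all.length > 2 then "medium" else "low" := by
  induction l generalizing h with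
  | nil => cases h <;> simp [pvBLoop]
  | cons a t ih =>
    have e : pvBLoop all (a :: t) h =
        if pvCrit a then "critical" else pvBLoop all t (h || pvHigh a) := rfl
    rw [e, List.any_cons, List.any_cons, ih]
    cases hC : pvCrit a <;> cases hH : pvHigh a <;> cases h <;> simp

-- ===== VERDICT (by name: the statement is the Claim_ definition above) =====
theorem determine_failure_severity_py_spec : Claim_equal_determine_failure_severity_py := by
  intro issues _
  unfold Spec_determine_failure_severity_py determine_failure_severity_py determine_failure_severity_py_alt
  rw [pvALoop1_eq, pvALoop2_eq, pvBLoop_eq]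
  cases hc : issues.any pvCrit <;> cases hh : issues.any pvHigh <;> simp
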